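-- pv_equiv track=rewrite | github.com/obinkytt/RagApp | app/minimal.py | filter_embedding_models
-- ===== SOURCE A (Python) =====
-- def filter_embedding_models(models: list[str]) -> list[str]:
--     """Heuristically filter embedding-capable models from Ollama tags."""
--     if not models:
--         return []
--     needles = (
--         "embed",
--         "e5",
--         "bge",
--         "gte",
--         "text-embedding",
--         "all-minilm",
--         "mxbai",
--         "nomic",
--         "snowflake",
--         "minilm",
--     )
--     out: list[str] = []
--     for m in models:
--         mm = m.lower()
--         if any(n in mm for n in needles):
--             out.append(m)
--     # prefer common embeddings at the top if present
--     order_hint = [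
--         "nomic-embed-text:latest",
--         "mxbai-embed-large",
--         "snowflake-arctic-embed",
--         "bge-m3",
--     ]
--     out_sorted = sorted(out, key=lambda x: (order_hint.index(x) if x in order_hint else 999, x))
--     return out_sorted
-- ===== SOURCE B (Python) =====
-- _NEEDLES = ("embed", "e5", "bge", "gte", "text-embedding", "all-minilm",
--             "mxbai", "nomic", "snowflake", "minilm")
-- _ORDER_HINT = [
--     "nomic-embed-text:latest",
--     "mxbai-embed-large",
--     "snowflake-arctic-embed",
--     "bge-m3",
-- ]
--
-- def filter_embedding_models(models: list[str]) -> list[str]: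
--     """Heuristically filter embedding-capable models from Ollama tags."""
--     keep = [m for m in models if any(n in m.lower() for n in _NEEDLES)]
--     hinted = sorted((m for m in keep if m in _ORDER_HINT), key=_ORDER_HINT.index)
--     rest = sorted(m for m in keep if m not in _ORDER_HINT)
--     return hinted + rest
-- ===== Notes on version B (the rewrite author's own statement) =====
-- stated objective: alternative
-- what changed: Instead of one sort with a composite (hint-index-or-999, name) key, B partitions the filtered list into hinted models (sorted by hint index alone) and the rest (sorted lexicographically) and concatenates the two buckets.
import Mathlib
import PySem

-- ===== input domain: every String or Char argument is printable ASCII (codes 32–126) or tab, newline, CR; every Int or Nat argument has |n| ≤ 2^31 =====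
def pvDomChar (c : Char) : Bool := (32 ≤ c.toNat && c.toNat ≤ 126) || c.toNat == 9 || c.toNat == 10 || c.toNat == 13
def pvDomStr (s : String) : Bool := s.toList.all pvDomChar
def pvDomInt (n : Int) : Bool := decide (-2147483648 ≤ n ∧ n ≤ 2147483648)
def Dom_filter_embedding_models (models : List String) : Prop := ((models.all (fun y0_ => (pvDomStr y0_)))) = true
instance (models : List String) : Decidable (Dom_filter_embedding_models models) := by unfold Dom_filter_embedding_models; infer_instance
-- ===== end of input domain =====

-- B replaces A's single composite-key sort by a partition into hinted and unhinted buckets,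
-- each sorted with a simple key and concatenated (alternative decomposition, same cost).


-- ===== PORT A =====
def pvNeedles : List String :=
  ["embed", "e5", "bge", "gte", "text-embedding", "all-minilm",
   "mxbai", "nomic", "snowflake", "minilm"]

def pvOrderHint : List String :=
  ["nomic-embed-text:latest", "mxbai-embed-large", "snowflake-arctic-embed", "bge-m3"]

-- A's composite key, first component: order_hint.index(x) if x in order_hint else 999
def pvKeyA (x : String) : Int :=
  if pvOrderHint.contains x then (((PySem.List.index? pvOrderHint x).getD 0 : Nat) : Int) else 999

def filter_embedding_models (models : List String) : List String :=
  if models = [] then []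
  else
    let out := models.foldl (fun acc m =>
      let mm := PySem.Str.lower m
      if pvNeedles.any (fun n => PySem.Str.isIn n mm) then acc ++ [m] else acc) []
    PySem.List.sorted2 out pvKeyA (fun x => x) false

-- ===== PORT B =====
def pvIsEmbed (m : String) : Bool :=
  pvNeedles.any (fun n => PySem.Str.isIn n (PySem.Str.lower m))

def pvKeyB (m : String) : Nat := (PySem.List.index? pvOrderHint m).getD 0

def filter_embedding_models_alt (models : List String) : List String :=
  let keep := models.filter pvIsEmbed
  let hinted := PySem.List.sorted (keep.filter (fun m => pvOrderHint.contains m)) pvKeyB false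
  let rest := PySem.List.sorted (keep.filter (fun m => !pvOrderHint.contains m)) (fun x => x) false
  hinted ++ rest

-- ===== PRECONDITION & SPEC =====
def Spec_filter_embedding_models (models : List String) (out : List String) : Prop := out = filter_embedding_models_alt models
instance (models : List String) (out : List String) : Decidable (Spec_filter_embedding_models models out) := by unfold Spec_filter_embedding_models; infer_instance

-- ===== CLAIM (what is proved, stated in full; the proofs are below) =====
def Claim_equal_filter_embedding_models : Prop := ∀ (models : List String), Dom_filter_embedding_models models → Spec_filter_embedding_models models (filter_embedding_models models)

-- ===== LEMMAS AND PROOFS =====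

-- A's sorted2 comparison predicate
def pvLt2 (a b : String) : Bool :=
  decide (pvKeyA a < pvKeyA b) || (!decide (pvKeyA b < pvKeyA a) && decide (a < b))

-- insertBy helpers (facts specific to the partition argument)
theorem insertBy_pass {α : Type} (before : α → α → Bool) (x : α) (H R : List α)
    (h : ∀ y ∈ H, before x y = false) :
    PySem.List.insertBy before x (H ++ R) = H ++ PySem.List.insertBy before x R := by
  induction H with
  | nil => rfl
  | cons a H ih =>
    have ha := h a (by simp)
    simp only [List.cons_append, PySem.List.insertBy, ha]
    simp [ih (fun y hy => h y (by simp [hy]))]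

theorem insertBy_stop {α : Type} (before : α → α → Bool) (x : α) (H R : List α)
    (h : ∀ y ∈ R, before x y = true) :
    PySem.List.insertBy before x (H ++ R) = PySem.List.insertBy before x H ++ R := by
  induction H with
  | nil =>
    cases R with
    | nil => rfl
    | cons r R =>
      have hr := h r (by simp)
      simp [PySem.List.insertBy, hr]
  | cons a H ih =>
    by_cases hb : before x a = true
    · simp [PySem.List.insertBy, hb]
    · simp only [Bool.not_eq_true] at hb
      simp only [List.cons_append, PySem.List.insertBy, hb]
      simp [ih]

theorem insertBy_congr {α : Type} (before before' : α → α → Bool) (x : α) (ys : List α)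
    (h : ∀ y ∈ ys, before x y = before' x y) :
    PySem.List.insertBy before x ys = PySem.List.insertBy before' x ys := by
  induction ys with
  | nil => rfl
  | cons a ys ih =>
    have ha := h a (by simp)
    by_cases hb : before x a = true
    · simp [PySem.List.insertBy, hb, ha ▸ hb]
    · simp only [Bool.not_eq_true] at hb
      simp only [PySem.List.insertBy, hb, ha ▸ hb]
      simp [ih (fun y hy => h y (by simp [hy]))]

theorem mem_hint_of_contains (x : String) (h : pvOrderHint.contains x = true) :
    x = "nomic-embed-text:latest" ∨ x = "mxbai-embed-large" ∨
    x = "snowflake-arctic-embed" ∨ x = "bge-m3" := by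
  have := List.mem_of_elem_eq_true h
  simpa [pvOrderHint] using this

theorem keyA_0 : pvKeyA "nomic-embed-text:latest" = 0 := by decide
theorem keyA_1 : pvKeyA "mxbai-embed-large" = 1 := by decide
theorem keyA_2 : pvKeyA "snowflake-arctic-embed" = 2 := by decide
theorem keyA_3 : pvKeyA "bge-m3" = 3 := by decide
theorem keyB_0 : pvKeyB "nomic-embed-text:latest" = 0 := by decide
theorem keyB_1 : pvKeyB "mxbai-embed-large" = 1 := by decide
theorem keyB_2 : pvKeyB "snowflake-arctic-embed" = 2 := by decide
theorem keyB_3 : pvKeyB "bge-m3" = 3 := by decide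

theorem keyA_lt (x : String) (hx : pvOrderHint.contains x = true) : pvKeyA x < 999 := by
  rcases mem_hint_of_contains x hx with hx' | hx' | hx' | hx' <;> subst hx' <;> decide

theorem keyA_999 (x : String) (hx : pvOrderHint.contains x = false) : pvKeyA x = 999 := by
  simp only [pvKeyA, hx, Bool.false_eq_true, if_false]

-- pointwise comparator facts
theorem lt2_of_both (x h : String) (hx : pvOrderHint.contains x = true)
    (hh : pvOrderHint.contains h = true) : pvLt2 x h = decide (pvKeyB x < pvKeyB h) := by
  rcases mem_hint_of_contains x hx with hx' | hx' | hx' | hx' <;>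
    rcases mem_hint_of_contains h hh with hh' | hh' | hh' | hh' <;>
    subst hx' <;> subst hh' <;>
    simp [pvLt2, keyA_0, keyA_1, keyA_2, keyA_3, keyB_0, keyB_1, keyB_2, keyB_3]

theorem lt2_cross (x r : String) (hx : pvOrderHint.contains x = true)
    (hr : pvOrderHint.contains r = false) : pvLt2 x r = true := by
  have h1 := keyA_lt x hx
  simp [pvLt2, keyA_999 r hr, h1]

theorem lt2_cross' (x h : String) (hx : pvOrderHint.contains x = false)
    (hh : pvOrderHint.contains h = true) : pvLt2 x h = false := by
  have h1 := keyA_lt h hh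
  have h2 : ¬ (999 < pvKeyA h) := by omega
  simp [pvLt2, keyA_999 x hx, h1, h2]

theorem lt2_of_neither (x r : String) (hx : pvOrderHint.contains x = false)
    (hr : pvOrderHint.contains r = false) : pvLt2 x r = decide (x < r) := by
  simp [pvLt2, keyA_999 x hx, keyA_999 r hr]

-- main partition invariant
theorem pv_main (out : List String) : ∀ (H R : List String),
    (∀ h ∈ H, pvOrderHint.contains h = true) → (∀ r ∈ R, pvOrderHint.contains r = false) →
    out.foldl (fun acc x => PySem.List.insertBy pvLt2 x acc) (H ++ R) =
      (out.filter (fun m => pvOrderHint.contains m)).foldl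
        (fun acc x => PySem.List.insertBy (fun a b => decide (pvKeyB a < pvKeyB b)) x acc) H ++
      (out.filter (fun m => !pvOrderHint.contains m)).foldl
        (fun acc x => PySem.List.insertBy (fun a b => decide (a < b)) x acc) R := by
  induction out with
  | nil => intro H R _ _; simp
  | cons x t ih =>
    intro H R hH hR
    by_cases hx : pvOrderHint.contains x = true
    · have step : PySem.List.insertBy pvLt2 x (H ++ R)
          = PySem.List.insertBy (fun a b => decide (pvKeyB a < pvKeyB b)) x H ++ R := by
        rw [insertBy_stop pvLt2 x H R (fun r hr => lt2_cross x r hx (hR r hr)),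
            insertBy_congr pvLt2 (fun a b => decide (pvKeyB a < pvKeyB b)) x H
              (fun h hh => lt2_of_both x h hx (hH h hh))]
      have hH' : ∀ h ∈ PySem.List.insertBy (fun a b => decide (pvKeyB a < pvKeyB b)) x H,
          pvOrderHint.contains h = true := by
        intro h hh
        rcases (PySem.List.mem_insertBy _ x h H).mp hh with rfl | hh
        · exact hx
        · exact hH h hh
      simp only [List.foldl_cons, List.filter_cons, hx, Bool.not_true, step]
      simpa using ih (PySem.List.insertBy (fun a b => decide (pvKeyB a < pvKeyB b)) x H) R hH' hR
    · have hx' : pvOrderHint.contains x = false := by simpa using hx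
      have step : PySem.List.insertBy pvLt2 x (H ++ R)
          = H ++ PySem.List.insertBy (fun a b => decide (a < b)) x R := by
        rw [insertBy_pass pvLt2 x H R (fun h hh => lt2_cross' x h hx' (hH h hh)),
            insertBy_congr pvLt2 (fun a b => decide (a < b)) x R
              (fun r hr => lt2_of_neither x r hx' (hR r hr))]
      have hR' : ∀ r ∈ PySem.List.insertBy (fun a b => decide (a < b)) x R,
          pvOrderHint.contains r = false := by
        intro r hr
        rcases (PySem.List.mem_insertBy _ x r R).mp hr with rfl | hr
        · exact hx'
        · exact hR r hr
      simp only [List.foldl_cons, List.filter_cons, hx', Bool.not_false, step]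
      simpa using ih H (PySem.List.insertBy (fun a b => decide (a < b)) x R) hH hR'

theorem pv_sorted2_eq (out : List String) :
    PySem.List.sorted2 out pvKeyA (fun x => x) false =
      out.foldl (fun acc x => PySem.List.insertBy pvLt2 x acc) [] := rfl

theorem pv_out_eq (models : List String) :
    models.foldl (fun acc m =>
      let mm := PySem.Str.lower m
      if pvNeedles.any (fun n => PySem.Str.isIn n mm) then acc ++ [m] else acc) [] =
    models.filter pvIsEmbed := by
  have := PySem.List.foldl_append_if pvIsEmbed (fun m => m) models []
  simpa [pvIsEmbed] using this

-- ===== VERDICT (by name: the statement is the Claim_ definition above) =====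
theorem filter_embedding_models_spec : Claim_equal_filter_embedding_models := by
  intro models _
  unfold Spec_filter_embedding_models filter_embedding_models filter_embedding_models_alt
  by_cases hm : models = []
  · subst hm; rfl
  · simp only [hm, if_false]
    rw [pv_out_eq, pv_sorted2_eq,
        PySem.List.sorted_eq_foldl_insertBy, PySem.List.sorted_eq_foldl_insertBy]
    exact pv_main (models.filter pvIsEmbed) [] [] (by intro h hh; simp at hh)
      (by intro r hr; simp at hr)
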